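-- pv_equiv track=rewrite | github.com/hhhyyeee/deep-learning-from-scratch | practice/priority_queue.py | check_beaker_liquid
-- ===== SOURCE A (Python) =====
-- import heapq
--
-- def check_beaker_liquid(_list, _threshold):
--     heapq.heapify(_list)
--
--     result = 0
--     while len(_list) >= 2:
--         min_ = heapq.heappop(_list)
--         if min_ >= _threshold:
--             return result
--
--         else:
--             min_2 = heapq.heappop(_list)
--             new_min = min_ + min_2
--             heapq.heappush(_list, new_min)
--             result += 1
--
--     if _list[0] >= _threshold:
--         return result
--     else:
--         return -1
-- ===== SOURCE B (Python) =====
-- def check_beaker_liquid(_list, _threshold):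
--     xs = sorted(_list)
--     result = 0
--     while len(xs) >= 2:
--         if xs[0] >= _threshold:
--             return result
--         s = xs[0] + xs[1]
--         rest = xs[2:]
--         i = 0
--         while i < len(rest) and rest[i] <= s:
--             i += 1
--         rest.insert(i, s)
--         xs = rest
--         result += 1
--     if xs[0] >= _threshold:
--         return result
--     return -1
-- ===== Notes on version B (the rewrite author's own statement) =====
-- stated objective: alternative
-- what changed: Replaces the binary heap (heapify + heappop/heappush) with sorting the list once and then maintaining sortedness by ordered insertion of each combined sum, reading the two minima off the front of the list.
import Mathlib
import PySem

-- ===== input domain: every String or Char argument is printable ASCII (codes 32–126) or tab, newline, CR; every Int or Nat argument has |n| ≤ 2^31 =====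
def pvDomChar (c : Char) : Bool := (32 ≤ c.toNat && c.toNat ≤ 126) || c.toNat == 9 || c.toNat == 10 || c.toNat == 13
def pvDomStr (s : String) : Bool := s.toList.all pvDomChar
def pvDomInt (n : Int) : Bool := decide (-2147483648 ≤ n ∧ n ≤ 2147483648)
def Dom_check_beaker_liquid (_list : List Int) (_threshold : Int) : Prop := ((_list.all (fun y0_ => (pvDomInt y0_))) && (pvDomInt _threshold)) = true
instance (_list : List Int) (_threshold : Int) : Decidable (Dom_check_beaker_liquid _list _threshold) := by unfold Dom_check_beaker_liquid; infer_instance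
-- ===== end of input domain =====

-- B replaces A's binary heap with sort-once plus ordered insertion of each combined sum
-- (objective: alternative).  A mutates _list in place (heapify/pops); the equivalence
-- proved here is about the RETURN value only.

-- ===== PORT A =====
-- heapq.heappop ported as "return the minimum, remove its first occurrence": exact for the
-- popped VALUE and for the list's multiset; the heap array's internal layout (and heappush's
-- placement of the new sum, ported as an append) is unobservable in this function, since the
-- list is only indexed again, via _list[0], once at most one element remains.
-- pvMin l = the minimum of l (the value heappop returns); 0 is never used: the loop only
-- calls pvMin on nonempty lists.
def pvMin (l : List Int) : Int := (PySem.List.min? l (fun x => x)).getD 0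

theorem pvMin_mem {l : List Int} (h : l ≠ []) : pvMin l ∈ l := by
  cases l with
  | nil => exact absurd rfl h
  | cons x t =>
    have hm := PySem.List.min?_id_cons x t
    have he : pvMin (x :: t) = t.foldl min x := by simp [pvMin, hm]
    rw [he]
    exact PySem.List.min?_mem hm

def pvHeapLoop (l : List Int) (t : Int) (r : Int) : Int :=
  if h2 : 2 ≤ l.length then
    -- min_ = heapq.heappop(_list); if min_ >= _threshold: return result
    if t ≤ pvMin l then r
    else
      -- min_2 = heapq.heappop(_list); heappush(_list, min_ + min_2); result += 1
      pvHeapLoop ((l.erase (pvMin l)).erase (pvMin (l.erase (pvMin l))) ++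
        [pvMin l + pvMin (l.erase (pvMin l))]) t (r + 1)
  else
    match l.head? with
    | some x => if t ≤ x then r else -1       -- if _list[0] >= _threshold: result else -1
    | none => -1                              -- _list[0] on []: IndexError, excluded by Pre_
termination_by l.length
decreasing_by
  have hne : l ≠ [] := by intro h; subst h; simp at h2
  have h1 := List.length_erase_of_mem (pvMin_mem hne)
  have hne1 : l.erase (pvMin l) ≠ [] := by
    intro h; rw [h] at h1; simp at h1; omega
  have hm2 := List.length_erase_of_mem (pvMin_mem hne1)
  simp only [List.length_append, List.length_cons, List.length_nil]
  omega

def check_beaker_liquid (_list : List Int) (_threshold : Int) : Int :=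
  pvHeapLoop _list _threshold 0

-- ===== PORT B =====
-- insert s into a sorted list, after any elements ≤ s (the inner while + insert of Source B)
def pvInsort (s : Int) : List Int → List Int
  | [] => [s]
  | x :: xs => if x ≤ s then x :: pvInsort s xs else s :: x :: xs

theorem pvInsort_length (s : Int) (l : List Int) :
    (pvInsort s l).length = l.length + 1 := by
  induction l with
  | nil => simp [pvInsort]
  | cons x xs ih => simp only [pvInsort]; split <;> simp [ih]

def pvAltLoop (xs : List Int) (t : Int) (r : Int) : Int :=
  match xs with
  | x :: y :: rest =>
      if t ≤ x then r
      else pvAltLoop (pvInsort (x + y) rest) t (r + 1)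
  | [x] => if t ≤ x then r else -1
  | [] => -1  -- xs[0] on the empty list: IndexError, excluded by Pre_
termination_by xs.length
decreasing_by simp [pvInsort_length]

def check_beaker_liquid_alt (_list : List Int) (_threshold : Int) : Int :=
  pvAltLoop (PySem.List.sorted _list (fun x => x)) _threshold 0

-- ===== PRECONDITION & SPEC =====
-- A raises IndexError on the empty list (_list[0] after the loop); excluded.
def Pre_check_beaker_liquid (_list : List Int) (_threshold : Int) : Prop := _list ≠ []
instance (_list : List Int) (_threshold : Int) : Decidable (Pre_check_beaker_liquid _list _threshold) := by unfold Pre_check_beaker_liquid; infer_instance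
def pvWitness_check_beaker_liquid : List Int × Int := ([1, 2, 3], 2)

def Spec_check_beaker_liquid (_list : List Int) (_threshold : Int) (out : Int) : Prop := out = check_beaker_liquid_alt _list _threshold
instance (_list : List Int) (_threshold : Int) (out : Int) : Decidable (Spec_check_beaker_liquid _list _threshold out) := by unfold Spec_check_beaker_liquid; infer_instance

-- ===== CLAIM (what is proved, stated in full; the proofs are below) =====
def Claim_equal_check_beaker_liquid : Prop := ∀ (_list : List Int) (_threshold : Int), Dom_check_beaker_liquid _list _threshold → Pre_check_beaker_liquid _list _threshold → Spec_check_beaker_liquid _list _threshold (check_beaker_liquid _list _threshold)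

-- ===== LEMMAS AND PROOFS =====

theorem pvMin_isMin {l : List Int} (h : l ≠ []) : ∀ y ∈ l, pvMin l ≤ y := by
  cases l with
  | nil => exact absurd rfl h
  | cons x t =>
    have hm := PySem.List.min?_id_cons x t
    intro y hy
    have := PySem.List.min?_isMin (m := t.foldl min x) hm y hy
    simpa [pvMin, hm] using this

theorem pvMin_perm {l l' : List Int} (hp : l.Perm l') : pvMin l = pvMin l' := by
  cases l with
  | nil => rw [hp.nil_eq]
  | cons x t =>
    have hne : (x :: t) ≠ [] := by simp
    have hne' : l' ≠ [] := by
      intro h; subst h; exact absurd hp.symm.nil_eq (by simp)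
    have h1 : pvMin (x :: t) ≤ pvMin l' :=
      pvMin_isMin hne _ (hp.mem_iff.mpr (pvMin_mem hne'))
    have h2 : pvMin l' ≤ pvMin (x :: t) :=
      pvMin_isMin hne' _ (hp.mem_iff.mp (pvMin_mem hne))
    omega

theorem pvHeapLoop_perm (t : Int) :
    ∀ n (l l' : List Int) (r : Int), l.length = n → l.Perm l' →
      pvHeapLoop l t r = pvHeapLoop l' t r := by
  intro n
  induction n using Nat.strong_induction_on with
  | _ n ih =>
    intro l l' r hn hp
    have hlen := hp.length_eq
    conv_lhs => rw [pvHeapLoop]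
    conv_rhs => rw [pvHeapLoop]
    by_cases h2 : 2 ≤ l.length
    · rw [dif_pos h2, dif_pos (hlen ▸ h2)]
      have hmin : pvMin l = pvMin l' := pvMin_perm hp
      by_cases ht : t ≤ pvMin l
      · rw [if_pos ht, if_pos (hmin ▸ ht)]
      · rw [if_neg ht, if_neg (hmin ▸ ht), ← hmin]
        have hp1 : (l.erase (pvMin l)).Perm (l'.erase (pvMin l)) := hp.erase _
        have hmin2 : pvMin (l.erase (pvMin l)) = pvMin (l'.erase (pvMin l)) :=
          pvMin_perm hp1
        rw [← hmin2]
        have hne : l ≠ [] := by intro h; subst h; simp at h2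
        have hlen1 := List.length_erase_of_mem (pvMin_mem hne)
        have hne1 : l.erase (pvMin l) ≠ [] := by
          intro h; rw [h] at hlen1; simp at hlen1; omega
        have hlen2 := List.length_erase_of_mem (pvMin_mem hne1)
        refine ih ((l.erase (pvMin l)).erase (pvMin (l.erase (pvMin l))) ++
            [pvMin l + pvMin (l.erase (pvMin l))]).length ?_ _ _ (r + 1) rfl
          ((hp1.erase _).append_right _)
        simp only [List.length_append, List.length_cons, List.length_nil]
        omega
    · rw [dif_neg h2, dif_neg (hlen ▸ h2)]
      have heq : l = l' := by
        cases l with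
        | nil => exact hp.nil_eq
        | cons a tl =>
          cases tl with
          | nil => exact (List.perm_singleton.mp hp.symm).symm
          | cons b tl2 => simp at h2
      rw [heq]

theorem pvInsort_perm (s : Int) (l : List Int) : (pvInsort s l).Perm (s :: l) := by
  induction l with
  | nil => simp [pvInsort]
  | cons x xs ih =>
    simp only [pvInsort]
    split
    · exact ((ih.cons x).trans (List.Perm.swap s x xs))
    · exact List.Perm.refl _

theorem pvInsort_pairwise {s : Int} {l : List Int} (hl : l.Pairwise (· ≤ ·)) :
    (pvInsort s l).Pairwise (· ≤ ·) := by
  induction l with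
  | nil => simp [pvInsort]
  | cons x xs ih =>
    rw [List.pairwise_cons] at hl
    obtain ⟨hx, hxs⟩ := hl
    simp only [pvInsort]
    split
    · rename_i hle
      rw [List.pairwise_cons]
      refine ⟨?_, ih hxs⟩
      intro y hy
      rcases List.mem_cons.mp ((pvInsort_perm s xs).mem_iff.mp hy) with h | h
      · subst h; omega
      · exact hx y h
    · rename_i hgt
      rw [List.pairwise_cons]
      refine ⟨?_, List.pairwise_cons.mpr ⟨hx, hxs⟩⟩
      intro y hy
      rcases List.mem_cons.mp hy with h | h
      · omega
      · have := hx y h; omega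

theorem pvMin_sorted_cons {x : Int} {xs : List Int}
    (h : (x :: xs).Pairwise (· ≤ ·)) : pvMin (x :: xs) = x := by
  have hne : (x :: xs) ≠ [] := by simp
  have h1 : pvMin (x :: xs) ≤ x := pvMin_isMin hne x (by simp)
  have h2 : x ≤ pvMin (x :: xs) := by
    rcases List.mem_cons.mp (pvMin_mem hne) with hh | hh
    · omega
    · exact (List.pairwise_cons.mp h).1 _ hh
  omega

theorem pvHeapLoop_sorted (t : Int) :
    ∀ n (xs : List Int) (r : Int), xs.length = n → xs.Pairwise (· ≤ ·) →
      pvHeapLoop xs t r = pvAltLoop xs t r := by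
  intro n
  induction n using Nat.strong_induction_on with
  | _ n ih =>
    intro xs r hn hs
    match xs with
    | [] =>
      conv_lhs => rw [pvHeapLoop]
      simp [pvAltLoop]
    | [x] =>
      conv_lhs => rw [pvHeapLoop]
      simp [pvAltLoop]
    | x :: y :: rest =>
      conv_lhs => rw [pvHeapLoop]
      conv_rhs => rw [pvAltLoop]
      have h2 : 2 ≤ (x :: y :: rest).length := by simp
      rw [dif_pos h2]
      have hm1 : pvMin (x :: y :: rest) = x := pvMin_sorted_cons hs
      have hs' : (y :: rest).Pairwise (· ≤ ·) := (List.pairwise_cons.mp hs).2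
      have hm2 : pvMin (y :: rest) = y := pvMin_sorted_cons hs'
      by_cases ht : t ≤ x
      · simp only [hm1, if_pos ht]
      · simp only [hm1, if_neg ht, List.erase_cons_head, hm2]
        have hperm : (rest ++ [x + y]).Perm (pvInsort (x + y) rest) :=
          (List.perm_append_singleton _ _).trans (pvInsort_perm _ _).symm
        rw [pvHeapLoop_perm t (rest ++ [x + y]).length _ _ (r + 1) rfl hperm]
        refine ih (pvInsort (x + y) rest).length ?_ _ (r + 1) rfl
          (pvInsort_pairwise (List.pairwise_cons.mp hs').2)
        subst hn
        simp [pvInsort_length]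

-- ===== VERDICT (by name: the statement is the Claim_ definition above) =====
theorem check_beaker_liquid_spec : Claim_equal_check_beaker_liquid := by
  intro l t _ _
  unfold Spec_check_beaker_liquid check_beaker_liquid check_beaker_liquid_alt
  have hperm : l.Perm (PySem.List.sorted l (fun x => x)) :=
    (PySem.List.sorted_perm l (fun x => x) false).symm
  rw [pvHeapLoop_perm t l.length _ _ 0 rfl hperm]
  exact pvHeapLoop_sorted t (PySem.List.sorted l (fun x => x)).length _ 0 rfl
    (PySem.List.sorted_pairwise l (fun x => x))
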